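-- pv_equiv track=rewrite | github.com/zeylanica/chatbot_project | logic.py | fruit_display_string
-- ===== SOURCE A (Python) =====
-- def fruit_number(number):
--     temp = [':watermelon:', ':melon:', ':grapes:', ':tangerine:', ':lemon:', ':apple:', ':peach:', ':cherries:',
--             ':lucky_seven:']
--     return temp[number]
--
-- def fruit_display_string(number_array):
--     temp = ""
--     idx = 0
--     for j in number_array:
--         if (idx % 3) == 2:
--             temp = temp + fruit_number(j) + '\n'
--             idx = idx + 1
--         else:
--             temp = temp + fruit_number(j)
--             idx = idx + 1
--     return temp
-- ===== SOURCE B (Python) =====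
-- def fruit_number(number):
--     temp = [':watermelon:', ':melon:', ':grapes:', ':tangerine:', ':lemon:', ':apple:', ':peach:', ':cherries:',
--             ':lucky_seven:']
--     return temp[number]
--
-- def fruit_display_string(number_array):
--     arr = list(number_array)
--     out = ""
--     for i in range(0, len(arr), 3):
--         chunk = arr[i:i + 3]
--         s = ""
--         for j in chunk:
--             s += fruit_number(j)
--         out += s + "\n" if len(chunk) == 3 else s
--     return out
-- ===== Notes on version B (the rewrite author's own statement) =====
-- stated objective: alternative
-- what changed: Replaces the running idx % 3 counter with an explicit pass over consecutive chunks of 3, appending '\n' exactly after complete chunks.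
import Mathlib
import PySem

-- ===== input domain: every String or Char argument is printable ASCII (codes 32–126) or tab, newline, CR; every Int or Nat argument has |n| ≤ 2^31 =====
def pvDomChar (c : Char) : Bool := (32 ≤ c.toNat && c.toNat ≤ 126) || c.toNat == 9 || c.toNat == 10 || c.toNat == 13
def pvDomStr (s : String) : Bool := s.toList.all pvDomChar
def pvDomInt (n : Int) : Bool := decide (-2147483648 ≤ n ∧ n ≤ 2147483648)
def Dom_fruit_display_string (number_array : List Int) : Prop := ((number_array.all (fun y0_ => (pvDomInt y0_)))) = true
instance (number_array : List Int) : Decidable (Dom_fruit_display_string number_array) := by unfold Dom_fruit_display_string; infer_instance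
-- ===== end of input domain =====

-- B rewrites A's running idx % 3 counter as an explicit pass over consecutive chunks of 3 (alternative decomposition, same cost).

-- ===== PORT A =====
def pvFruits : List String := [":watermelon:", ":melon:", ":grapes:", ":tangerine:", ":lemon:", ":apple:", ":peach:", ":cherries:", ":lucky_seven:"]

-- temp[number]; total form pyGetD is exact under Pre_ (index in range; out of range Python raises IndexError)
def fruit_number (number : Int) : String := PySem.List.pyGetD pvFruits number ""

def fruit_display_string (number_array : List Int) : String :=
  (number_array.foldl
    (fun (st : String × Int) j =>
      if PySem.Int.mod st.2 3 == 2 then (st.1 ++ fruit_number j ++ "\n", st.2 + 1)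
      else (st.1 ++ fruit_number j, st.2 + 1))
    ("", 0)).1

-- ===== PORT B =====
-- s = ""  ;  for j in chunk: s += fruit_number(j)
def pvChunkStr (chunk : List Int) : String :=
  chunk.foldl (fun s j => s ++ fruit_number j) ""

-- the loop over chunks arr[i:i+3]: a full chunk gets '\n', the final partial chunk does not
def pvBGo : List Int → String
  | a :: b :: c :: rest => (pvChunkStr [a, b, c] ++ "\n") ++ pvBGo rest
  | [] => ""
  | [a] => pvChunkStr [a]
  | [a, b] => pvChunkStr [a, b]

def fruit_display_string_alt (number_array : List Int) : String :=
  pvBGo number_array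

-- ===== PRECONDITION & SPEC =====
-- Pre_ excludes exactly the inputs on which fruit_number raises IndexError (index outside -9..8)
def Pre_fruit_display_string (number_array : List Int) : Prop :=
  ∀ j ∈ number_array, -9 ≤ j ∧ j < 9
instance (number_array : List Int) : Decidable (Pre_fruit_display_string number_array) := by
  unfold Pre_fruit_display_string; infer_instance
def pvWitness_fruit_display_string : List Int := [0, 3, -1, 8]

def Spec_fruit_display_string (number_array : List Int) (out : String) : Prop := out = fruit_display_string_alt number_array
instance (number_array : List Int) (out : String) : Decidable (Spec_fruit_display_string number_array out) := by unfold Spec_fruit_display_string; infer_instance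

-- ===== CLAIM (what is proved, stated in full; the proofs are below) =====
def Claim_equal_fruit_display_string : Prop := ∀ (number_array : List Int), Dom_fruit_display_string number_array → Pre_fruit_display_string number_array → Spec_fruit_display_string number_array (fruit_display_string number_array)

-- ===== LEMMAS AND PROOFS =====
theorem pvMod3_0 (k : Int) : PySem.Int.mod (3 * k) 3 = 0 := by
  rw [PySem.Int.mod_eq_emod_of_pos (by omega)]; omega

theorem pvMod3_1 (k : Int) : PySem.Int.mod (3 * k + 1) 3 = 1 := by
  rw [PySem.Int.mod_eq_emod_of_pos (by omega)]; omega

theorem pvMod3_2 (k : Int) : PySem.Int.mod (3 * k + 2) 3 = 2 := by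
  rw [PySem.Int.mod_eq_emod_of_pos (by omega)]; omega

theorem pvGo_eq (l : List Int) : ∀ (temp : String) (k : Int),
    (l.foldl
      (fun (st : String × Int) j =>
        if PySem.Int.mod st.2 3 == 2 then (st.1 ++ fruit_number j ++ "\n", st.2 + 1)
        else (st.1 ++ fruit_number j, st.2 + 1))
      (temp, 3 * k)).1 = temp ++ pvBGo l := by
  induction l using pvBGo.induct with
  | case1 a b c rest ih =>
    intro temp k
    have h0 : (PySem.Int.mod (3 * k) 3 == 2) = false := by rw [pvMod3_0]; rfl
    have h1 : (PySem.Int.mod (3 * k + 1) 3 == 2) = false := by rw [pvMod3_1]; rfl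
    have h2 : (PySem.Int.mod (3 * k + 1 + 1) 3 == 2) = true := by
      rw [show (3:Int) * k + 1 + 1 = 3 * k + 2 by ring, pvMod3_2]; rfl
    simp only [List.foldl_cons, h0, h1, h2, Bool.false_eq_true, if_false, if_true]
    rw [show (3:Int) * k + 1 + 1 + 1 = 3 * (k + 1) by ring, ih]
    simp [pvBGo, pvChunkStr, String.append_assoc]
  | case2 =>
    intro temp k
    simp [pvBGo]
  | case3 a =>
    intro temp k
    have h0 : (PySem.Int.mod (3 * k) 3 == 2) = false := by rw [pvMod3_0]; rfl
    simp only [List.foldl_cons, List.foldl_nil, h0, Bool.false_eq_true, if_false]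
    simp [pvBGo, pvChunkStr]
  | case4 a b =>
    intro temp k
    have h0 : (PySem.Int.mod (3 * k) 3 == 2) = false := by rw [pvMod3_0]; rfl
    have h1 : (PySem.Int.mod (3 * k + 1) 3 == 2) = false := by rw [pvMod3_1]; rfl
    simp only [List.foldl_cons, List.foldl_nil, h0, h1, Bool.false_eq_true, if_false]
    simp [pvBGo, pvChunkStr, String.append_assoc]

-- ===== VERDICT (by name: the statement is the Claim_ definition above) =====
theorem fruit_display_string_spec : Claim_equal_fruit_display_string := by
  intro number_array _ _
  unfold Spec_fruit_display_string fruit_display_string fruit_display_string_alt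
  have := pvGo_eq number_array "" 0
  simpa using this
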